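-- pv_equiv track=rewrite | github.com/antenore/voynich-toolkit | src/voynich_toolkit/prefix_resolve.py | _normalize_italian_for_lookup
-- ===== SOURCE A (Python) =====
-- def _normalize_italian_for_lookup(word):
--     """Normalize Italian word for lexicon lookup (simplified)."""
--     w = word.lower()
--     # Common medieval Italian normalizations
--     w = w.replace("ch", "k").replace("gh", "g")
--     w = w.replace("ph", "p").replace("th", "t")
--     # Double consonants → single
--     prev = ""
--     result = []
--     for c in w:
--         if c != prev or c in "aeiou":
--             result.append(c)
--         prev = c
--     return "".join(result)
-- ===== SOURCE B (Python) =====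
-- def _normalize_italian_for_lookup(word):
--     """Normalize Italian word for lexicon lookup (simplified)."""
--     w = word.lower()
--     w = w.replace("ch", "k").replace("gh", "g")
--     w = w.replace("ph", "p").replace("th", "t")
--     # Collapse each maximal run of equal characters: keep the whole run for
--     # vowels, a single character for anything else.
--     out = []
--     i = 0
--     n = len(w)
--     while i < n:
--         c = w[i]
--         j = i + 1
--         while j < n and w[j] == c:
--             j += 1
--         out.append(w[i:j] if c in "aeiou" else c)
--         i = j
--     return "".join(out)
-- ===== Notes on version B (the rewrite author's own statement) =====
-- stated objective: alternative
-- what changed: The per-character prev-tracking loop is replaced by a run-based scan: the string is cut into maximal runs of equal characters, each run kept whole if it is a vowel run and collapsed to one character otherwise.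
import Mathlib
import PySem

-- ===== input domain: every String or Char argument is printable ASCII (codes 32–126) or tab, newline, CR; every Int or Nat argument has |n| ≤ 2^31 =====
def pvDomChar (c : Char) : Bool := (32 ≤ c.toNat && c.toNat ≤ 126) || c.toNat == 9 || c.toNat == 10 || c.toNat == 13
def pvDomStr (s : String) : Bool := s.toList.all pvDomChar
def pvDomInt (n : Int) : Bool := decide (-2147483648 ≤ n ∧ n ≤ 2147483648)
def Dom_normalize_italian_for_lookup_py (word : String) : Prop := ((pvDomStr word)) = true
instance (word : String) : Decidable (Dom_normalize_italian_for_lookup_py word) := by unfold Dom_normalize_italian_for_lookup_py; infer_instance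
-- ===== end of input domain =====

-- B replaces A's per-character prev-tracking loop by a run-based scan (maximal equal-character
-- runs, vowel runs kept whole, other runs collapsed to one char): an alternative of the same cost.


-- ===== PORT A =====
-- `c in "aeiou"`
def pvVowel (c : Char) : Bool := "aeiou".toList.contains c

-- literal port of A: lower, the four replaces, then the prev-tracking loop.
-- Python's initial `prev = ""` (a char never equals "") is represented as `none`.
def normalize_italian_for_lookup_py (word : String) : String :=
  let w := PySem.Str.lower word
  let w := PySem.Str.replace (PySem.Str.replace w "ch" "k") "gh" "g"
  let w := PySem.Str.replace (PySem.Str.replace w "ph" "p") "th" "t"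
  let st := w.toList.foldl
    (fun (st : Option Char × List Char) c =>
      (some c, if (some c != st.1) || pvVowel c then st.2 ++ [c] else st.2))
    (none, [])
  String.mk st.2

-- ===== PORT B =====
-- run-based collapse: take the maximal run of the head character, keep it whole for a
-- vowel, one char otherwise, recurse on the rest (Source B's outer/inner while loops).
def pvRuns (l : List Char) : List Char :=
  match l with
  | [] => []
  | c :: cs =>
    (if pvVowel c then c :: cs.takeWhile (fun d => d == c) else [c]) ++
      pvRuns (cs.dropWhile (fun d => d == c))
termination_by l.length
decreasing_by
  exact Nat.lt_succ_of_le (List.length_dropWhile_le _ _)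

def normalize_italian_for_lookup_py_alt (word : String) : String :=
  let w := PySem.Str.lower word
  let w := PySem.Str.replace (PySem.Str.replace w "ch" "k") "gh" "g"
  let w := PySem.Str.replace (PySem.Str.replace w "ph" "p") "th" "t"
  String.mk (pvRuns w.toList)

-- ===== PRECONDITION & SPEC =====
def Spec_normalize_italian_for_lookup_py (word : String) (out : String) : Prop := out = normalize_italian_for_lookup_py_alt word
instance (word : String) (out : String) : Decidable (Spec_normalize_italian_for_lookup_py word out) := by unfold Spec_normalize_italian_for_lookup_py; infer_instance

-- ===== CLAIM (what is proved, stated in full; the proofs are below) =====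
def Claim_equal_normalize_italian_for_lookup_py : Prop := ∀ (word : String), Dom_normalize_italian_for_lookup_py word → Spec_normalize_italian_for_lookup_py word (normalize_italian_for_lookup_py word)

-- ===== LEMMAS AND PROOFS =====

-- A's loop, recursively: emit c iff it differs from prev or is a vowel.
def pvAgo (p : Option Char) : List Char → List Char
  | [] => []
  | c :: cs => (if (some c != p) || pvVowel c then [c] else []) ++ pvAgo (some c) cs

theorem pvFoldl_eq_ago (l : List Char) (p : Option Char) (acc : List Char) :
    (l.foldl
      (fun (st : Option Char × List Char) c =>
        (some c, if (some c != st.1) || pvVowel c then st.2 ++ [c] else st.2))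
      (p, acc)).2 = acc ++ pvAgo p l := by
  induction l generalizing p acc with
  | nil => simp [pvAgo]
  | cons c cs ih =>
    simp only [List.foldl_cons, pvAgo, ih]
    split <;> simp

theorem pvAgo_some (cs : List Char) (c : Char) :
    pvAgo (some c) cs =
      (if pvVowel c then cs.takeWhile (fun d => d == c) else []) ++
        pvAgo none (cs.dropWhile (fun d => d == c)) := by
  induction cs generalizing c with
  | nil => simp [pvAgo]
  | cons d cs ih =>
    by_cases h : d = c
    · subst h
      simp only [pvAgo, ih d, List.takeWhile_cons, List.dropWhile_cons, beq_self_eq_true]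
      split <;> simp_all
    · have hne : (some d != some c) = true := by simp [h]
      simp only [pvAgo, List.takeWhile_cons, List.dropWhile_cons]
      have hdc : (d == c) = false := by simp [h]
      simp [pvAgo, hdc, hne]

theorem pvAgo_none_eq_runs : ∀ (n : Nat) (l : List Char), l.length ≤ n →
    pvAgo none l = pvRuns l := by
  intro n
  induction n with
  | zero =>
    intro l hl
    have : l = [] := List.eq_nil_of_length_eq_zero (Nat.le_zero.mp hl)
    subst this; simp [pvAgo, pvRuns]
  | succ n ih =>
    intro l hl
    match l with
    | [] => simp [pvAgo, pvRuns]
    | c :: cs =>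
      have hlen : (cs.dropWhile (fun d => d == c)).length ≤ n := by
        have := List.length_dropWhile_le (fun d => d == c) cs
        simp at hl; omega
      rw [pvRuns]
      simp only [pvAgo, pvAgo_some, ih _ hlen]
      by_cases hv : pvVowel c = true <;> simp [hv]

-- ===== VERDICT (by name: the statement is the Claim_ definition above) =====
theorem normalize_italian_for_lookup_py_spec : Claim_equal_normalize_italian_for_lookup_py := by
  intro word _
  unfold Spec_normalize_italian_for_lookup_py normalize_italian_for_lookup_py
    normalize_italian_for_lookup_py_alt
  simp only [pvFoldl_eq_ago, List.nil_append]
  rw [pvAgo_none_eq_runs _ _ (Nat.le_refl _)]
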